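-- pv_equiv track=rewrite | github.com/magahall/TDE | raul.py | pc
-- ===== SOURCE A (Python) =====
-- def pc(lt1, lt2):
--     resultado = []
--     repetidos = set()
--     for x in lt1:
--         for y in lt2:
--             if (x, y) not in repetidos:
--                 resultado.append(f'({x}, {y})')
--                 repetidos.add((x, y))
--     return f'Produto Cartesiano: conjunto 1 {{{", ".join(lt1)}}}, conjunto 2 {{{", ".join(lt2)}}}. Resultado: {{{", ".join(resultado)}}}'
-- ===== SOURCE B (Python) =====
-- def pc(lt1, lt2):
--     u1 = list(dict.fromkeys(lt1))
--     u2 = list(dict.fromkeys(lt2))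
--     resultado = [f'({x}, {y})' for x in u1 for y in u2]
--     return f'Produto Cartesiano: conjunto 1 {{{", ".join(lt1)}}}, conjunto 2 {{{", ".join(lt2)}}}. Resultado: {{{", ".join(resultado)}}}'
-- ===== Notes on version B (the rewrite author's own statement) =====
-- stated objective: simpler
-- what changed: Replaced the per-pair seen-set membership check inside the nested loop by two upfront first-occurrence dedup passes (dict.fromkeys) followed by a plain product comprehension with no check.
import Mathlib
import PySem

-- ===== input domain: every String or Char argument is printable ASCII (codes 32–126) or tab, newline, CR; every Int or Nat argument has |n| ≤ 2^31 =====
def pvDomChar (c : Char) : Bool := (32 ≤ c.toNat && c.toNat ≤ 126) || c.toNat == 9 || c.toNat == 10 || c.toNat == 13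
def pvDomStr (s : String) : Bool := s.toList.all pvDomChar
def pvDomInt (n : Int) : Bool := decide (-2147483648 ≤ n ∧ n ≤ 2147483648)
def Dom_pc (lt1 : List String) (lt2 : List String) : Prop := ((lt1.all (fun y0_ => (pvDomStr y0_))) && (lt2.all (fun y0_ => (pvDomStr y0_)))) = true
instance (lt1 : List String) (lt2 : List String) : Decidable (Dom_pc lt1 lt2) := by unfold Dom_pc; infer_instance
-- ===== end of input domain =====

-- B replaces A's inline per-pair seen-set check by two upfront dedup passes and a plain
-- product over the deduplicated lists (same output; objective: simpler decomposition).

-- ===== PORT A =====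
-- f'({x}, {y})'
def fmtPair (x y : String) : String := "(" ++ x ++ ", " ++ y ++ ")"

def pc (lt1 : List String) (lt2 : List String) : String :=
  let st := lt1.foldl (fun st x =>
    lt2.foldl (fun st y =>
      if PySem.Set.contains st.2 (x, y) then st
      else (st.1 ++ [fmtPair x y], PySem.Set.add st.2 (x, y))) st)
    (([] : List String), (PySem.Set.empty : PySem.Set (String × String)))
  "Produto Cartesiano: conjunto 1 {" ++ PySem.Str.join ", " lt1 ++
    "}, conjunto 2 {" ++ PySem.Str.join ", " lt2 ++
    "}. Resultado: {" ++ PySem.Str.join ", " st.1 ++ "}"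

-- ===== PORT B =====
def pc_alt (lt1 : List String) (lt2 : List String) : String :=
  let u1 := PySem.List.dedup lt1
  let u2 := PySem.List.dedup lt2
  let resultado := u1.flatMap (fun x => u2.map (fun y => fmtPair x y))
  "Produto Cartesiano: conjunto 1 {" ++ PySem.Str.join ", " lt1 ++
    "}, conjunto 2 {" ++ PySem.Str.join ", " lt2 ++
    "}. Resultado: {" ++ PySem.Str.join ", " resultado ++ "}"

-- ===== PRECONDITION & SPEC =====
def Spec_pc (lt1 : List String) (lt2 : List String) (out : String) : Prop := out = pc_alt lt1 lt2
instance (lt1 : List String) (lt2 : List String) (out : String) : Decidable (Spec_pc lt1 lt2 out) := by unfold Spec_pc; infer_instance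

-- ===== CLAIM (what is proved, stated in full; the proofs are below) =====
def Claim_equal_pc : Prop := ∀ (lt1 : List String) (lt2 : List String), Dom_pc lt1 lt2 → Spec_pc lt1 lt2 (pc lt1 lt2)

-- ===== LEMMAS AND PROOFS =====

-- first-occurrence dedup relative to an already-seen list Y
def dd (Y : List String) : List String → List String
  | [] => []
  | y :: ys => if y ∈ Y then dd Y ys else y :: dd (y :: Y) ys

-- the inner loop of A, with x fixed
def innerStep (x : String) (st : List String × PySem.Set (String × String)) (y : String) :
    List String × PySem.Set (String × String) :=
  if PySem.Set.contains st.2 (x, y) then st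
  else (st.1 ++ [fmtPair x y], PySem.Set.add st.2 (x, y))

theorem inner_skip (x : String) (ys : List String) (acc : List String)
    (s : PySem.Set (String × String)) (h : ∀ y ∈ ys, (x, y) ∈ s) :
    ys.foldl (innerStep x) (acc, s) = (acc, s) := by
  induction ys with
  | nil => rfl
  | cons y ys ih =>
      have hy : (x, y) ∈ s := h y (by simp)
      simp only [List.foldl_cons, innerStep]
      rw [if_pos (by simpa [PySem.Set.contains_iff] using hy)]
      exact ih (fun y' hy' => h y' (by simp [hy']))

theorem inner_fresh (x : String) (ys : List String) (acc : List String)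
    (s : PySem.Set (String × String)) (Y : List String)
    (h : ∀ b, (x, b) ∈ s ↔ b ∈ Y) :
    (ys.foldl (innerStep x) (acc, s)).1 = acc ++ (dd Y ys).map (fun y => fmtPair x y) ∧
    (∀ a b, (a, b) ∈ (ys.foldl (innerStep x) (acc, s)).2 ↔ (a, b) ∈ s ∨ (a = x ∧ b ∈ ys)) := by
  induction ys generalizing acc s Y with
  | nil => simp [dd]
  | cons y ys ih =>
      by_cases hy : y ∈ Y
      · have hmem : (x, y) ∈ s := (h y).2 hy
        simp only [List.foldl_cons, innerStep]
        rw [if_pos (by simpa [PySem.Set.contains_iff] using hmem)]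
        obtain ⟨h1, h2⟩ := ih acc s Y h
        refine ⟨by simpa [dd, hy] using h1, fun a b => ?_⟩
        rw [h2 a b]
        constructor
        · rintro (hs | ⟨rfl, hb⟩)
          · exact Or.inl hs
          · exact Or.inr ⟨rfl, by simp [hb]⟩
        · rintro (hs | ⟨rfl, hb⟩)
          · exact Or.inl hs
          · rcases List.mem_cons.mp hb with rfl | hb
            · exact Or.inl hmem
            · exact Or.inr ⟨rfl, hb⟩
      · have hnmem : (x, y) ∉ s := fun hc => hy ((h y).1 hc)
        simp only [List.foldl_cons, innerStep]
        rw [if_neg (by simpa [PySem.Set.contains_iff] using hnmem)]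
        obtain ⟨h1, h2⟩ := ih (acc ++ [fmtPair x y]) (PySem.Set.add s (x, y)) (y :: Y)
          (by intro b; rw [PySem.Set.mem_add]
              constructor
              · rintro (hs | hb)
                · exact List.mem_cons.mpr (Or.inr ((h b).1 hs))
                · exact List.mem_cons.mpr (Or.inl (congrArg Prod.snd hb))
              · intro hb
                rcases List.mem_cons.mp hb with rfl | hb
                · exact Or.inr rfl
                · exact Or.inl ((h b).2 hb))
        refine ⟨by simpa [dd, hy] using h1, fun a b => ?_⟩
        rw [h2 a b, PySem.Set.mem_add]
        constructor
        · rintro ((hs | hab) | ⟨rfl, hb⟩)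
          · exact Or.inl hs
          · obtain ⟨h1', h2'⟩ := Prod.mk.injEq a b x y ▸ hab
            exact Or.inr ⟨h1', by simp [h2']⟩
          · exact Or.inr ⟨rfl, by simp [hb]⟩
        · rintro (hs | ⟨rfl, hb⟩)
          · exact Or.inl (Or.inl hs)
          · rcases List.mem_cons.mp hb with rfl | hb
            · exact Or.inl (Or.inr rfl)
            · exact Or.inr ⟨rfl, hb⟩

theorem outer_inv (lt2 : List String) (xs : List String) (acc : List String)
    (s : PySem.Set (String × String)) (X : List String)
    (h : ∀ a b, (a, b) ∈ s ↔ a ∈ X ∧ b ∈ lt2) :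
    (xs.foldl (fun st x => lt2.foldl (innerStep x) st) (acc, s)).1 =
      acc ++ (dd X xs).flatMap (fun x => (dd [] lt2).map (fun y => fmtPair x y)) := by
  induction xs generalizing acc s X with
  | nil => simp [dd]
  | cons x xs ih =>
      by_cases hx : x ∈ X
      · simp only [List.foldl_cons]
        rw [inner_skip x lt2 acc s (fun y hy => (h x y).2 ⟨hx, hy⟩)]
        simpa [dd, hx] using ih acc s X h
      · have hfresh : ∀ b, (x, b) ∈ s ↔ b ∈ ([] : List String) := by
          intro b
          simp only [List.not_mem_nil, iff_false]
          exact fun hc => hx ((h x b).1 hc).1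
        obtain ⟨h1, h2⟩ := inner_fresh x lt2 acc s [] hfresh
        simp only [List.foldl_cons]
        rw [show lt2.foldl (innerStep x) (acc, s) =
              (acc ++ (dd [] lt2).map (fun y => fmtPair x y),
               (lt2.foldl (innerStep x) (acc, s)).2) from Prod.ext h1 rfl]
        rw [ih _ _ (x :: X) (by
          intro a b
          rw [h2 a b, h a b]
          constructor
          · rintro (⟨ha, hb⟩ | ⟨rfl, hb⟩)
            · exact ⟨List.mem_cons.mpr (Or.inr ha), hb⟩
            · exact ⟨List.mem_cons.mpr (Or.inl rfl), hb⟩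
          · rintro ⟨ha, hb⟩
            rcases List.mem_cons.mp ha with rfl | ha
            · exact Or.inr ⟨rfl, hb⟩
            · exact Or.inl ⟨ha, hb⟩)]
        simp [dd, hx]

-- dd [] = Python's dict.fromkeys order dedup
theorem update_eq_dd (ys : List String) : ∀ (s : PySem.Set String) (Y : List String),
    (∀ y, y ∈ s ↔ y ∈ Y) → PySem.Set.update s ys = s ++ dd Y ys := by
  induction ys with
  | nil => intro s Y _; simp [PySem.Set.update, dd]
  | cons y ys ih =>
      intro s Y h
      by_cases hy : y ∈ Y
      · have hadd : PySem.Set.add s y = s := by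
          simp [PySem.Set.add, (h y).2 hy]
        have hstep : PySem.Set.update s (y :: ys) = PySem.Set.update s ys := by
          simp [PySem.Set.update, hadd]
        rw [hstep, ih s Y h]
        simp [dd, hy]
      · have hns : y ∉ s := fun hc => hy ((h y).1 hc)
        have hadd : PySem.Set.add s y = s ++ [y] := by simp [PySem.Set.add, hns]
        have hstep : PySem.Set.update s (y :: ys) = PySem.Set.update (s ++ [y]) ys := by
          simp [PySem.Set.update, hadd]
        rw [hstep, ih (s ++ [y]) (y :: Y) (by intro z; simp [h z, or_comm])]
        simp [dd, hy]

theorem ofList_eq_dd (ys : List String) : PySem.Set.ofList ys = dd [] ys := by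
  have := update_eq_dd ys PySem.Set.empty [] (by simp [PySem.Set.empty])
  simpa [PySem.Set.ofList, PySem.Set.update, PySem.Set.empty] using this

-- ===== VERDICT (by name: the statement is the Claim_ definition above) =====
theorem pc_spec : Claim_equal_pc := by
  intro lt1 lt2 _
  unfold Spec_pc
  simp only [pc, pc_alt]
  have hstep : ∀ x : String, innerStep x = (fun st y =>
      if PySem.Set.contains st.2 (x, y) then st
      else (st.1 ++ [fmtPair x y], PySem.Set.add st.2 (x, y))) := fun _ => rfl
  have hmain := outer_inv lt2 lt1 [] PySem.Set.empty [] (by simp [PySem.Set.empty])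
  simp only [hstep] at hmain
  rw [hmain]
  simp only [List.nil_append, PySem.List.dedup_eq_ofList, ofList_eq_dd]
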